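-- pv_equiv track=rewrite | github.com/Lasssssa/JOURNEY_MANAGEMENT_APP | bfs.py | DFS
-- ===== SOURCE A (Python) =====
-- def DFS(sommet,arrivee,g):
--     a_explorer=[sommet]
--     deja_vu=[]
--     chemin={}
--     chemin[sommet]=[sommet]
--     while len(a_explorer)!=0:
--         v=a_explorer.pop(-1)
--         if v not in deja_vu:
--             deja_vu.append(v)
--             if v in g:
--                 for adj in g[v]:
--                     if adj not in deja_vu:#il faut séparer ces deux éléments
--                         a_explorer.append(adj)#il faut mettre à jour le chemin mais il ne faut pas le considéré comme exploré
--                         chemin[adj]=chemin[v]+[adj]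
--
--
--     chemins=[]
--     for element in chemin.keys():
--         if chemin[element][-1]==arrivee:
--             chemins.append(chemin[element])
--
--
--     return chemins
-- ===== SOURCE B (Python) =====
-- def DFS(sommet, arrivee, g):
--     # Same iterative DFS discovery, but store one predecessor pointer per node
--     # instead of a full path list; the final path (only ever needed for
--     # `arrivee`) is rebuilt once by walking the pointers back to `sommet`.
--     parent = {sommet: None}
--     deja_vu = []
--     a_explorer = [sommet]
--     while a_explorer:
--         v = a_explorer.pop()
--         if v in deja_vu:
--             continue
--         deja_vu.append(v)
--         for adj in g.get(v, []):
--             if adj not in deja_vu: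
--                 a_explorer.append(adj)
--                 parent[adj] = v
--     if arrivee not in parent:
--         return []
--     path = []
--     x = arrivee
--     while x is not None:
--         path.append(x)
--         x = parent[x]
--     path.reverse()
--     return [path]
-- ===== Notes on version B (the rewrite author's own statement) =====
-- stated objective: simpler
-- what changed: B stores a single predecessor pointer per node instead of a full path list, rebuilds only the path to arrivee by walking the pointers once, and drops A's final scan over all nodes (the filter can only ever keep the path ending at arrivee).
import Mathlib
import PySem

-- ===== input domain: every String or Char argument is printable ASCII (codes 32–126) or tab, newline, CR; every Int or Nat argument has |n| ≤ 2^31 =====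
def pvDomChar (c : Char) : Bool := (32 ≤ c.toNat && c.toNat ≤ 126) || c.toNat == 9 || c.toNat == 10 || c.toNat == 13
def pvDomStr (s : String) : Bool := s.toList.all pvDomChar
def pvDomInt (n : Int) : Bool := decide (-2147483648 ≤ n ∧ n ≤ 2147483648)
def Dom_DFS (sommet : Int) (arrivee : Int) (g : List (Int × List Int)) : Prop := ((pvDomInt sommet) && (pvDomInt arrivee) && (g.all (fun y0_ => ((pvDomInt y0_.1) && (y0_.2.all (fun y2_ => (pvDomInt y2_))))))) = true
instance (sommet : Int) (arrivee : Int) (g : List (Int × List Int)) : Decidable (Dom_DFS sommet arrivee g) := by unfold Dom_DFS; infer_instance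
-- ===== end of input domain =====

-- B replaces A's per-node full-path dictionary by one predecessor pointer per node and
-- rebuilds only the single path to `arrivee` (A's final filter can only ever keep that one);
-- objective: simpler (less state, no full-path copies, no final scan over all nodes).

-- Shared fuel bound for the while-loops of both ports (each loop iteration pops one
-- element; at most 1 + sum of adjacency-list lengths elements are ever pushed).
def pvFuel (g : List (Int × List Int)) : Nat := g.foldl (fun n p => n + p.2.length) 1

-- ===== PORT A =====
-- A's while-loop: state (a_explorer, deja_vu, chemin); `a_explorer.pop(-1)` = PySem.List.pop?;
-- `if v in g: for adj in g[v]` = match on first-match lookup (none ↔ `v not in g`).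
def DFS_loop (g : List (Int × List Int)) : Nat → List Int → List Int → PySem.Dict Int (List Int) → PySem.Dict Int (List Int)
  | 0, _, _, chemin => chemin
  | fuel+1, a_explorer, deja_vu, chemin =>
    match PySem.List.pop? a_explorer with
    | none => chemin
    | some (v, rest) =>
      if v ∈ deja_vu then DFS_loop g fuel rest deja_vu chemin
      else
        let deja_vu' := deja_vu ++ [v]
        match (PySem.Dict.mk g).get? v with
        | none => DFS_loop g fuel rest deja_vu' chemin
        | some adjs =>
          -- chemin[v] is always present here; getD [] is exact (Python's chemin[v] cannot KeyError)
          let st := adjs.foldl (fun (s : List Int × PySem.Dict Int (List Int)) adj =>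
              if adj ∈ deja_vu' then s
              else (s.1 ++ [adj], s.2.insert adj ((s.2.getD v []) ++ [adj]))) (rest, chemin)
          DFS_loop g fuel st.1 deja_vu' st.2

def DFS (sommet : Int) (arrivee : Int) (g : List (Int × List Int)) : List (List Int) :=
  let chemin := DFS_loop g (pvFuel g) [sommet] [] (PySem.Dict.empty.insert sommet [sommet])
  -- final pass: for element in chemin.keys(): if chemin[element][-1]==arrivee: append.
  -- chemin[element] is present and nonempty for every key, so getD []/pyGet? are exact.
  chemin.keys.foldl (fun chemins element =>
    if PySem.List.pyGet? (chemin.getD element []) (-1) = some arrivee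
    then chemins ++ [chemin.getD element []] else chemins) []

-- ===== PORT B =====
-- B's while-loop: same discovery, but stores parent[adj] = v (None for the root).
def DFS_alt_loop (g : List (Int × List Int)) : Nat → List Int → List Int → PySem.Dict Int (Option Int) → PySem.Dict Int (Option Int)
  | 0, _, _, parent => parent
  | fuel+1, a_explorer, deja_vu, parent =>
    match PySem.List.pop? a_explorer with
    | none => parent
    | some (v, rest) =>
      if v ∈ deja_vu then DFS_alt_loop g fuel rest deja_vu parent
      else
        let deja_vu' := deja_vu ++ [v]
        -- g.get(v, [])
        let st := ((PySem.Dict.mk g).getD v []).foldl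
            (fun (s : List Int × PySem.Dict Int (Option Int)) adj =>
              if adj ∈ deja_vu' then s else (s.1 ++ [adj], s.2.insert adj (some v))) (rest, parent)
        DFS_alt_loop g fuel st.1 deja_vu' st.2

-- B's reconstruction walk (`while x is not None`); fueled by the dict size, which always
-- suffices because parent chains are duplicate-free and stay inside the dict's keys.
def DFS_alt_recon (parent : PySem.Dict Int (Option Int)) : Nat → Int → List Int → List Int
  | 0, x, path => (path ++ [x]).reverse
  | fuel+1, x, path =>
    match parent.get? x with
    | some (some u) => DFS_alt_recon parent fuel u (path ++ [x])
    | _ => (path ++ [x]).reverse   -- parent[x] is None (missing key is unreachable)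

def DFS_alt (sommet : Int) (arrivee : Int) (g : List (Int × List Int)) : List (List Int) :=
  let parent := DFS_alt_loop g (pvFuel g) [sommet] [] (PySem.Dict.empty.insert sommet none)
  if parent.contains arrivee then [DFS_alt_recon parent parent.size arrivee []] else []

-- ===== PRECONDITION & SPEC =====
def Spec_DFS (sommet : Int) (arrivee : Int) (g : List (Int × List Int)) (out : List (List Int)) : Prop := out = DFS_alt sommet arrivee g
instance (sommet : Int) (arrivee : Int) (g : List (Int × List Int)) (out : List (List Int)) : Decidable (Spec_DFS sommet arrivee g out) := by unfold Spec_DFS; infer_instance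

-- ===== CLAIM (what is proved, stated in full; the proofs are below) =====
def Claim_equal_DFS : Prop := ∀ (sommet : Int) (arrivee : Int) (g : List (Int × List Int)), Dom_DFS sommet arrivee g → Spec_DFS sommet arrivee g (DFS sommet arrivee g)

-- ===== LEMMAS AND PROOFS =====

-- `DFSChain parent x P`: walking parent pointers from x reaches the root, and P is the
-- resulting root-to-x path.
inductive DFSChain (parent : PySem.Dict Int (Option Int)) : Int → List Int → Prop
  | root (x : Int) : parent.get? x = some none → DFSChain parent x [x]
  | step (x u : Int) (Q : List Int) : parent.get? x = some (some u) →
      DFSChain parent u Q → DFSChain parent x (Q ++ [x])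

theorem DFSChain.getLast {parent : PySem.Dict Int (Option Int)} {x : Int} {P : List Int}
    (h : DFSChain parent x P) : P.getLast? = some x := by
  cases h with
  | root _ _ => rfl
  | step _ _ _ _ _ => exact List.getLast?_concat

theorem DFSChain.congr {parent parent' : PySem.Dict Int (Option Int)} {x : Int} {P : List Int}
    (h : DFSChain parent x P) (hagree : ∀ y ∈ P, parent'.get? y = parent.get? y) :
    DFSChain parent' x P := by
  induction h with
  | root x hx => exact .root x ((hagree x (by simp)) ▸ hx)
  | step x u Q hx _ ih =>
    exact .step x u Q ((hagree x (by simp)) ▸ hx)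
      (ih fun y hy => hagree y (by simp [hy]))

theorem DFSChain.recon {parent : PySem.Dict Int (Option Int)} {x : Int} {P : List Int}
    (h : DFSChain parent x P) :
    ∀ (f : Nat) (acc : List Int), P.length ≤ f + 1 →
      DFS_alt_recon parent f x acc = P ++ acc.reverse := by
  induction h with
  | root x hx =>
    intro f acc _
    cases f with
    | zero => simp [DFS_alt_recon]
    | succ f => simp [DFS_alt_recon, hx]
  | step x u Q hx hQ ih =>
    intro f acc hlen
    have hQne : Q ≠ [] := by
      have := hQ.getLast; rintro rfl; simp at this
    have h1Q : 1 ≤ Q.length := List.length_pos_iff.mpr hQne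
    cases f with
    | zero => exfalso; simp at hlen; exact hQne hlen
    | succ f =>
      have : DFS_alt_recon parent (f+1) x acc = DFS_alt_recon parent f u (acc ++ [x]) := by
        simp [DFS_alt_recon, hx]
      rw [this, ih f (acc ++ [x]) (by simp at hlen ⊢; omega)]
      simp

-- Loop invariant relating A's chemin to B's parent.
def DFSInv (seen stack : List Int) (chemin : PySem.Dict Int (List Int))
    (parent : PySem.Dict Int (Option Int)) : Prop :=
  chemin.keys = parent.keys ∧ chemin.keys.Nodup ∧
  (∀ x ∈ stack, x ∈ chemin.keys) ∧
  (∀ x P, chemin.get? x = some P →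
      DFSChain parent x P ∧ P.getLast? = some x ∧ P.Nodup ∧
      (∀ y ∈ P, y = x ∨ y ∈ seen) ∧ (∀ y ∈ P, y ∈ chemin.keys))

-- What survives to the end of the loop.
def DFSFin (chemin : PySem.Dict Int (List Int)) (parent : PySem.Dict Int (Option Int)) : Prop :=
  chemin.keys = parent.keys ∧ chemin.keys.Nodup ∧
  (∀ x P, chemin.get? x = some P →
      DFSChain parent x P ∧ P.getLast? = some x ∧ P.length ≤ chemin.keys.length)

theorem inv_to_fin {seen stack : List Int} {chemin : PySem.Dict Int (List Int)}
    {parent : PySem.Dict Int (Option Int)} (h : DFSInv seen stack chemin parent) :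
    DFSFin chemin parent := by
  obtain ⟨h1, h2, _, h4⟩ := h
  refine ⟨h1, h2, fun x P hP => ?_⟩
  obtain ⟨hc, hl, hnd, _, hsub⟩ := h4 x P hP
  exact ⟨hc, hl, (hnd.subperm hsub).length_le⟩

theorem inv_mono_seen {seen stack : List Int} {v : Int} {chemin : PySem.Dict Int (List Int)}
    {parent : PySem.Dict Int (Option Int)} (h : DFSInv seen stack chemin parent) :
    DFSInv (seen ++ [v]) stack chemin parent := by
  obtain ⟨h1, h2, h3, h4⟩ := h
  refine ⟨h1, h2, h3, fun x P hP => ?_⟩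
  obtain ⟨hc, hl, hnd, hseen, hsub⟩ := h4 x P hP
  refine ⟨hc, hl, hnd, fun y hy => ?_, hsub⟩
  rcases hseen y hy with h' | h' <;> simp [h']

theorem inv_stack_sub {seen stack stack' : List Int} {chemin : PySem.Dict Int (List Int)}
    {parent : PySem.Dict Int (Option Int)} (h : DFSInv seen stack chemin parent)
    (hs : ∀ x ∈ stack', x ∈ stack) : DFSInv seen stack' chemin parent :=
  ⟨h.1, h.2.1, fun x hx => h.2.2.1 x (hs x hx), h.2.2.2⟩

theorem nodup_concat' (l : List Int) (a : Int) (h : a ∉ l) (h2 : l.Nodup) : (l ++ [a]).Nodup := by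
  simp only [List.nodup_append, List.nodup_cons]
  refine ⟨h2, by simp, ?_⟩
  intro x hx b hb
  simp only [List.mem_singleton] at hb
  subst hb; intro hxb; exact h (hxb ▸ hx)

theorem get?_of_mem_keys {ν : Type} (d : PySem.Dict Int ν) {k : Int} (h : k ∈ d.keys) :
    ∃ w, d.get? k = some w := by
  cases hg : d.get? k with
  | none => exact absurd ((PySem.Dict.get?_eq_none_iff_not_mem_keys d k).mp hg) (not_not_intro h)
  | some w => exact ⟨w, rfl⟩

-- one push step of the inner `for adj in g[v]` loop preserves the invariant
theorem insert_inv {seen' st : List Int} {v adj : Int} {ch : PySem.Dict Int (List Int)}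
    {pa : PySem.Dict Int (Option Int)} (hv : v ∈ seen') (hadj : adj ∉ seen')
    (hInv : DFSInv seen' st ch pa) {Pv : List Int} (hPv : ch.get? v = some Pv) :
    DFSInv seen' (st ++ [adj]) (ch.insert adj (Pv ++ [adj])) (pa.insert adj (some v)) := by
  obtain ⟨hK, hND, hST, hMain⟩ := hInv
  obtain ⟨hcv, hlv, hndv, hsv, hsubv⟩ := hMain v Pv hPv
  have hadjv : adj ≠ v := fun h => hadj (h ▸ hv)
  have hadjPv : adj ∉ Pv := by
    intro hmem
    rcases hsv adj hmem with h | h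
    · exact hadjv h
    · exact hadj h
  have hKeys : (ch.insert adj (Pv ++ [adj])).keys = (pa.insert adj (some v)).keys := by
    by_cases hmem : adj ∈ ch.keys
    · rw [PySem.Dict.keys_insert_of_contains _ _ (by rw [PySem.Dict.contains_eq_decide_mem_keys]; simp [hmem]),
          PySem.Dict.keys_insert_of_contains _ _ (by rw [PySem.Dict.contains_eq_decide_mem_keys]; simp [hK ▸ hmem]), hK]
    · rw [PySem.Dict.keys_insert_of_not_contains _ _ (by rw [PySem.Dict.contains_eq_decide_mem_keys]; simp [hmem]),
          PySem.Dict.keys_insert_of_not_contains _ _ (by rw [PySem.Dict.contains_eq_decide_mem_keys]; simp [hK ▸ hmem]), hK]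
  refine ⟨hKeys, PySem.Dict.nodup_keys_insert _ _ _ hND, ?_, ?_⟩
  · intro x hx
    rcases List.mem_append.mp hx with h | h
    · exact (PySem.Dict.mem_keys_insert _ _ _ _).mpr (Or.inr (hST x h))
    · simp only [List.mem_singleton] at h
      exact (PySem.Dict.mem_keys_insert _ _ _ _).mpr (Or.inl h)
  · intro x P hP
    rw [PySem.Dict.get?_insert] at hP
    by_cases hx : x = adj
    · rw [if_pos hx] at hP
      have hPeq : P = Pv ++ [adj] := by injection hP with h; exact h.symm
      subst hPeq; subst hx
      have hchain' : DFSChain (pa.insert x (some v)) v Pv :=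
        hcv.congr (fun y hy => PySem.Dict.get?_insert_of_ne _ _
          (fun h => hadjPv (h ▸ hy)))
      refine ⟨.step x v Pv (PySem.Dict.get?_insert_self _ _ _) hchain',
        List.getLast?_concat, nodup_concat' _ _ hadjPv hndv, ?_, ?_⟩
      · intro y hy
        rcases List.mem_append.mp hy with h | h
        · rcases hsv y h with h' | h'
          · exact Or.inr (h' ▸ hv)
          · exact Or.inr h'
        · simp only [List.mem_singleton] at h; exact Or.inl h
      · intro y hy
        rcases List.mem_append.mp hy with h | h
        · exact (PySem.Dict.mem_keys_insert _ _ _ _).mpr (Or.inr (hsubv y h))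
        · simp only [List.mem_singleton] at h
          exact (PySem.Dict.mem_keys_insert _ _ _ _).mpr (Or.inl h)
    · rw [if_neg hx] at hP
      obtain ⟨hc, hl, hnd, hseen, hsub⟩ := hMain x P hP
      have hadjP : adj ∉ P := by
        intro hmem
        rcases hseen adj hmem with h | h
        · exact hx h.symm
        · exact hadj h
      refine ⟨hc.congr (fun y hy => PySem.Dict.get?_insert_of_ne _ _
          (fun h => hadjP (h ▸ hy))), hl, hnd, hseen, ?_⟩
      intro y hy
      exact (PySem.Dict.mem_keys_insert _ _ _ _).mpr (Or.inr (hsub y hy))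

theorem fold_inv (seen' : List Int) (v : Int) (hv : v ∈ seen') :
    ∀ (adjs st : List Int) (ch : PySem.Dict Int (List Int)) (pa : PySem.Dict Int (Option Int)),
      DFSInv seen' st ch pa → v ∈ ch.keys →
      (adjs.foldl (fun (s : List Int × PySem.Dict Int (List Int)) adj =>
          if adj ∈ seen' then s
          else (s.1 ++ [adj], s.2.insert adj ((s.2.getD v []) ++ [adj]))) (st, ch)).1
        = (adjs.foldl (fun (s : List Int × PySem.Dict Int (Option Int)) adj =>
          if adj ∈ seen' then s else (s.1 ++ [adj], s.2.insert adj (some v))) (st, pa)).1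
      ∧ DFSInv seen'
          (adjs.foldl (fun (s : List Int × PySem.Dict Int (List Int)) adj =>
            if adj ∈ seen' then s
            else (s.1 ++ [adj], s.2.insert adj ((s.2.getD v []) ++ [adj]))) (st, ch)).1
          (adjs.foldl (fun (s : List Int × PySem.Dict Int (List Int)) adj =>
            if adj ∈ seen' then s
            else (s.1 ++ [adj], s.2.insert adj ((s.2.getD v []) ++ [adj]))) (st, ch)).2
          (adjs.foldl (fun (s : List Int × PySem.Dict Int (Option Int)) adj =>
            if adj ∈ seen' then s else (s.1 ++ [adj], s.2.insert adj (some v))) (st, pa)).2 := by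
  intro adjs
  induction adjs with
  | nil => intro st ch pa hInv hvk; exact ⟨rfl, hInv⟩
  | cons adj rest ih =>
    intro st ch pa hInv hvk
    simp only [List.foldl_cons]
    by_cases hadj : adj ∈ seen'
    · simp only [if_pos hadj]
      exact ih st ch pa hInv hvk
    · simp only [if_neg hadj]
      obtain ⟨Pv, hPv⟩ := get?_of_mem_keys ch hvk
      have hgetD : ch.getD v [] = Pv := PySem.Dict.getD_of_get?_eq_some _ _ hPv
      rw [hgetD]
      exact ih _ _ _ (insert_inv hv hadj hInv hPv)
        ((PySem.Dict.mem_keys_insert _ _ _ _).mpr (Or.inr hvk))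

theorem loop_fin (g : List (Int × List Int)) :
    ∀ (fuel : Nat) (stack seen : List Int) (ch : PySem.Dict Int (List Int))
      (pa : PySem.Dict Int (Option Int)), DFSInv seen stack ch pa →
      DFSFin (DFS_loop g fuel stack seen ch) (DFS_alt_loop g fuel stack seen pa) := by
  intro fuel
  induction fuel with
  | zero => intro stack seen ch pa h; exact inv_to_fin h
  | succ fuel ih =>
    intro stack seen ch pa h
    rcases List.eq_nil_or_concat stack with rfl | ⟨ys, y, rfl⟩
    · simp only [DFS_loop, DFS_alt_loop, show PySem.List.pop? ([] : List Int) = none from rfl]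
      exact inv_to_fin h
    · rw [List.concat_eq_append] at h ⊢
      simp only [DFS_loop, DFS_alt_loop, PySem.List.pop?_last]
      have hys : ∀ x ∈ ys, x ∈ ys ++ [y] := fun x hx => List.mem_append.mpr (Or.inl hx)
      by_cases hseen : y ∈ seen
      · simp only [if_pos hseen]
        exact ih ys seen ch pa (inv_stack_sub h hys)
      · simp only [if_neg hseen]
        have hyk : y ∈ ch.keys := h.2.2.1 y (by simp)
        have hInv' : DFSInv (seen ++ [y]) ys ch pa := inv_mono_seen (inv_stack_sub h hys)
        cases hg : (PySem.Dict.mk g).get? y with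
        | none =>
          have hgD : (PySem.Dict.mk g).getD y [] = [] := by
            rw [PySem.Dict.getD_eq_get?_getD, hg]; rfl
          simp only [hgD, List.foldl_nil]
          exact ih ys (seen ++ [y]) ch pa hInv'
        | some adjs =>
          have hgD : (PySem.Dict.mk g).getD y [] = adjs := PySem.Dict.getD_of_get?_eq_some _ _ hg
          simp only [hgD]
          obtain ⟨hst, hInv2⟩ := fold_inv (seen ++ [y]) y (by simp) adjs ys ch pa hInv' hyk
          rw [← hst]
          exact ih _ _ _ _ hInv2

theorem pick_lemma (val : Int → List Int) (a : Int) :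
    ∀ (l : List Int) (acc : List (List Int)), l.Nodup →
      l.foldl (fun acc x => if x = a then acc ++ [val x] else acc) acc
        = acc ++ (if a ∈ l then [val a] else []) := by
  intro l
  induction l with
  | nil => intro acc _; simp
  | cons x l ih =>
    intro acc hnd
    by_cases hx : x = a
    · have hnotin : a ∉ l := hx ▸ (List.nodup_cons.mp hnd).1
      simp only [List.foldl_cons, if_pos hx]
      rw [ih _ (List.nodup_cons.mp hnd).2]
      simp [hx, hnotin]
    · simp only [List.foldl_cons, if_neg hx]
      rw [ih _ (List.nodup_cons.mp hnd).2]
      have : (a = x ∨ a ∈ l) ↔ a ∈ l := by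
        constructor
        · rintro (rfl | h)
          · exact absurd rfl hx
          · exact h
        · exact Or.inr
      simp [List.mem_cons, this]

-- ===== VERDICT (by name: the statement is the Claim_ definition above) =====
theorem DFS_spec : Claim_equal_DFS := by
  unfold Claim_equal_DFS
  intro s a g _
  unfold Spec_DFS DFS DFS_alt
  have hInv0 : DFSInv [] [s] (PySem.Dict.empty.insert s [s]) (PySem.Dict.empty.insert s none) := by
    refine ⟨?_, ?_, ?_, ?_⟩
    · rw [PySem.Dict.keys_insert_of_not_contains _ _ (PySem.Dict.contains_empty _),
          PySem.Dict.keys_insert_of_not_contains _ _ (PySem.Dict.contains_empty _)]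
      rfl
    · rw [PySem.Dict.keys_insert_of_not_contains _ _ (PySem.Dict.contains_empty _)]
      simp [PySem.Dict.keys_empty]
    · intro x hx
      simp only [List.mem_singleton] at hx
      exact (PySem.Dict.mem_keys_insert _ _ _ _).mpr (Or.inl hx)
    · intro x P hP
      rw [PySem.Dict.get?_insert] at hP
      by_cases hx : x = s
      · rw [if_pos hx] at hP
        have hPeq : P = [s] := by injection hP with h; exact h.symm
        subst hPeq; subst hx
        refine ⟨.root x (PySem.Dict.get?_insert_self _ _ _), rfl, by simp, ?_, ?_⟩
        · intro y hy; simp only [List.mem_singleton] at hy; exact Or.inl hy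
        · intro y hy; simp only [List.mem_singleton] at hy
          exact (PySem.Dict.mem_keys_insert _ _ _ _).mpr (Or.inl hy)
      · rw [if_neg hx, PySem.Dict.get?_empty] at hP
        exact absurd hP (by simp)
  have hFin := loop_fin g (pvFuel g) [s] [] _ _ hInv0
  obtain ⟨hK, hND, hMain⟩ := hFin
  set ch := DFS_loop g (pvFuel g) [s] [] (PySem.Dict.empty.insert s [s]) with hch
  set pa := DFS_alt_loop g (pvFuel g) [s] [] (PySem.Dict.empty.insert s none) with hpa
  have hcong : ∀ (acc : List (List Int)), ∀ x ∈ ch.keys,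
      (if PySem.List.pyGet? (ch.getD x []) (-1) = some a then acc ++ [ch.getD x []] else acc)
        = (if x = a then acc ++ [ch.getD x []] else acc) := by
    intro acc x hx
    obtain ⟨P, hP⟩ := get?_of_mem_keys ch hx
    obtain ⟨_, hl, _⟩ := hMain x P hP
    rw [PySem.Dict.getD_of_get?_eq_some _ _ hP, PySem.List.pyGet?_neg_one, hl]
    by_cases hxa : x = a
    · simp [hxa]
    · rw [if_neg (by simpa using fun h => hxa h), if_neg hxa]
  rw [PySem.List.foldl_congr_mem _ _ _ _ hcong,
      pick_lemma (fun x => ch.getD x []) a ch.keys [] hND]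
  simp only [List.nil_append]
  rw [PySem.Dict.contains_eq_decide_mem_keys, ← hK]
  by_cases hmem : a ∈ ch.keys
  · simp only [hmem, if_pos, decide_true]
    obtain ⟨P, hP⟩ := get?_of_mem_keys ch hmem
    obtain ⟨hc, _, hlen⟩ := hMain a P hP
    rw [PySem.Dict.getD_of_get?_eq_some _ _ hP]
    have hsz : ch.keys.length = pa.size := by
      rw [hK]; simp [PySem.Dict.size, PySem.Dict.keys]
    rw [hc.recon pa.size [] (by omega)]
    simp
  · simp [hmem]
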